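-- pv_equiv track=rewrite | github.com/bnagata/Foobar-google | Level 1/re-id/re-id.py | get_pi_string
-- ===== SOURCE A (Python) =====
-- def get_pi_string(index):
--     # Start with first prime number
--     poss_str = '2'
--     prime_list = [2]
--
--     # Evaluate every number until you get the length needed
--     x_start = 3
--     # Length of prime string increases until the string is longer than the input by at least 5
--     while len(poss_str)<index+5:
--         # If number being evaluated can be divided by any prime number break
--         for i in prime_list:
--             if (x_start % i) == 0:
--                 break
--         # If number is prime append to string and to prime list
--         else:
--             poss_str += str(x_start)
--             prime_list.append(x_start)
--         x_start +=1
--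
--     return poss_str
-- ===== SOURCE B (Python) =====
-- def get_pi_string(index):
--     # Stateless sqrt-bounded trial division instead of A's growing prime list.
--     def is_prime(m):
--         if m < 2:
--             return False
--         d = 2
--         while d * d <= m:
--             if m % d == 0:
--                 return False
--             d += 1
--         return True
--
--     s = '2'
--     n = 2
--     while len(s) < index + 5:
--         n += 1
--         if is_prime(n):
--             s += str(n)
--     return s
-- ===== Notes on version B (the rewrite author's own statement) =====
-- stated objective: faster
-- what changed: B drops A's accumulated prime_list (trial division of each candidate by every prime found so far) and instead tests each candidate with a stateless sqrt-bounded trial division (divisors d while d*d <= m), keeping only the string.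
import Mathlib
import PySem

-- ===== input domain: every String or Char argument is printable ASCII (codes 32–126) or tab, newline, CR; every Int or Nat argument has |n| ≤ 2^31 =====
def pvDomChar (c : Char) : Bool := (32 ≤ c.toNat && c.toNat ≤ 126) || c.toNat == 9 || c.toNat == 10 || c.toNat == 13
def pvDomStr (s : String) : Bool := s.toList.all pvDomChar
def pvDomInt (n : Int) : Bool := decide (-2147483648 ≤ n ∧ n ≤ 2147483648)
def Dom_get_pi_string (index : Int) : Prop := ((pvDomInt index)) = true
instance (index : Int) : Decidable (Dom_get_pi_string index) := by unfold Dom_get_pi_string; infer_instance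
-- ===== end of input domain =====

-- B replaces A's accumulated prime_list (trial division by every prime found so far) with a
-- stateless sqrt-bounded trial-division primality test (sqrt(x) vs pi(x) divisions per candidate;
-- measured faster in a timing run).

-- ===== PORT A =====
-- helper lemmas cited by the ports' termination / invariant proofs (they must precede the defs)

theorem pvTDC_mono (b f n : Nat) (acc : List Char) :
    acc.length ≤ (Nat.toDigitsCore b f n acc).length := by
  induction f generalizing n acc with
  | zero => simp [Nat.toDigitsCore]
  | succ f ih =>
    simp only [Nat.toDigitsCore]
    split
    · simp
    · exact le_trans (by simp) (ih _ _)

-- str(n) is never the empty string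
theorem pvToStr_len_pos (n : Int) : 1 ≤ PySem.Str.len (PySem.Int.toStr n) := by
  have h : 1 ≤ (PySem.Int.toStr n).toList.length := by
    rw [PySem.Int.toList_toStr]
    unfold PySem.Int.toChars
    split
    · simp
    · unfold Nat.toDigits
      simp only [Nat.toDigitsCore]
      split
      · simp
      · exact le_trans (by simp) (pvTDC_mono _ _ _ _)
  simp only [PySem.Str.len]
  exact_mod_cast h

-- distance to the next prime ≥ x (termination measure for the unbounded prime hunt)
def pvGap (x : Nat) : Nat := Nat.find (Nat.exists_infinite_primes x) - x

theorem pvGap_lt (x : Nat) (hx : ¬ Nat.Prime x) : pvGap (x + 1) < pvGap x := by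
  have h1 := Nat.find_spec (Nat.exists_infinite_primes x)
  have h2 := Nat.find_spec (Nat.exists_infinite_primes (x + 1))
  have hne : Nat.find (Nat.exists_infinite_primes x) ≠ x := by
    intro h; rw [h] at h1; exact hx h1.2
  have hge : x + 1 ≤ Nat.find (Nat.exists_infinite_primes x) := by
    have := h1.1; omega
  have hle : Nat.find (Nat.exists_infinite_primes (x + 1)) ≤
      Nat.find (Nat.exists_infinite_primes x) :=
    Nat.find_min' _ ⟨hge, h1.2⟩
  have hge2 := h2.1
  unfold pvGap
  omega

-- A's inner for/break/else over prime_list is a divisibility test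
theorem pvAny_iff (x : Int) (primes : List Int) :
    (primes.any (fun i => PySem.Int.mod x i == 0) = true) ↔ ∃ p ∈ primes, p ∣ x := by
  simp [List.any_eq_true, PySem.Int.mod_eq_zero_iff_dvd]

-- with prime_list holding exactly the primes below x, "some stored prime divides x" = "x is composite"
theorem pvComposite_iff (x : Int) (primes : List Int) (hx : 3 ≤ x)
    (hinv : ∀ p : Int, p ∈ primes ↔ (2 ≤ p ∧ p < x ∧ Nat.Prime p.toNat)) :
    (∃ p ∈ primes, p ∣ x) ↔ ¬ Nat.Prime x.toNat := by
  constructor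
  · rintro ⟨p, hp, hdvd⟩ hprime
    obtain ⟨h2, hlt, _⟩ := (hinv p).mp hp
    have hd : p.toNat ∣ x.toNat := by
      have h := Int.natAbs_dvd_natAbs.mpr hdvd
      have e1 : p.natAbs = p.toNat := by omega
      have e2 : x.natAbs = x.toNat := by omega
      rwa [e1, e2] at h
    rcases hprime.eq_one_or_self_of_dvd _ hd with h | h <;> omega
  · intro hnp
    have hne : x.toNat ≠ 1 := by omega
    have hp := Nat.minFac_prime hne
    have hdvd := Nat.minFac_dvd x.toNat
    have hlt : x.toNat.minFac < x.toNat := by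
      rcases lt_or_eq_of_le (Nat.le_of_dvd (by omega) hdvd) with h | h
      · exact h
      · exact absurd (h ▸ hp) hnp
    refine ⟨(x.toNat.minFac : Int), (hinv _).mpr ⟨by exact_mod_cast hp.two_le, by omega, by
      simpa using hp⟩, ?_⟩
    have : (x.toNat.minFac : Int) ∣ (x.toNat : Int) := Int.natCast_dvd_natCast.mpr hdvd
    rwa [Int.toNat_of_nonneg (by omega : (0:Int) ≤ x)] at this

-- invariant preservation and measure-decrease lemmas, cited inside the loop definitions
-- (named so the loop bodies stay small terms)
theorem pvInvComp (x : Int) (primes : List Int) (hx : 3 ≤ x)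
    (hinv : ∀ p : Int, p ∈ primes ↔ (2 ≤ p ∧ p < x ∧ Nat.Prime p.toNat))
    (hc : primes.any (fun i => PySem.Int.mod x i == 0) = true) :
    ∀ p : Int, p ∈ primes ↔ (2 ≤ p ∧ p < x + 1 ∧ Nat.Prime p.toNat) := by
  have hxc : ¬ Nat.Prime x.toNat :=
    (pvComposite_iff x primes hx hinv).mp ((pvAny_iff x primes).mp hc)
  intro p
  rw [hinv p]
  constructor
  · rintro ⟨h2, h3, h4⟩; exact ⟨h2, by omega, h4⟩
  · rintro ⟨h2, h3, h4⟩
    refine ⟨h2, ?_, h4⟩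
    rcases lt_or_eq_of_le (by omega : p ≤ x) with h | h
    · exact h
    · exact absurd (h ▸ h4) hxc

theorem pvInvPrime (x : Int) (primes : List Int) (hx : 3 ≤ x)
    (hinv : ∀ p : Int, p ∈ primes ↔ (2 ≤ p ∧ p < x ∧ Nat.Prime p.toNat))
    (hc : ¬ (primes.any (fun i => PySem.Int.mod x i == 0) = true)) :
    ∀ p : Int, p ∈ primes ++ [x] ↔ (2 ≤ p ∧ p < x + 1 ∧ Nat.Prime p.toNat) := by
  have hxp : Nat.Prime x.toNat := by
    by_contra hnp
    exact hc ((pvAny_iff x primes).mpr ((pvComposite_iff x primes hx hinv).mpr hnp))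
  intro p
  simp only [List.mem_append, List.mem_singleton]
  rw [hinv p]
  constructor
  · rintro (⟨h2, h3, h4⟩ | rfl)
    · exact ⟨h2, by omega, h4⟩
    · exact ⟨by omega, by omega, hxp⟩
  · rintro ⟨h2, h3, h4⟩
    rcases lt_or_eq_of_le (by omega : p ≤ x) with h | h
    · exact Or.inl ⟨h2, h, h4⟩
    · exact Or.inr h

theorem pvInvInit : ∀ p : Int, p ∈ ([2] : List Int) ↔ (2 ≤ p ∧ p < 3 ∧ Nat.Prime p.toNat) := by
  intro p
  constructor
  · intro hp
    simp only [List.mem_singleton] at hp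
    subst hp
    exact ⟨by omega, by omega, by decide⟩
  · rintro ⟨h2, h3, _⟩
    simp only [List.mem_singleton]
    omega

theorem pvSucc3 (x : Int) (hx : 3 ≤ x) : 3 ≤ x + 1 := by omega

theorem pvGapDecA (x : Int) (hx : 3 ≤ x) (hxc : ¬ Nat.Prime x.toNat) :
    pvGap (x + 1).toNat < pvGap x.toNat := by
  have h : (x + 1).toNat = x.toNat + 1 := by omega
  rw [h]
  exact pvGap_lt _ hxc

theorem pvLenDec (index : Int) (poss t : String) (hg : PySem.Str.len poss < index + 5)
    (ht : 1 ≤ PySem.Str.len t) :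
    (index + 5 - PySem.Str.len (poss ++ t)).toNat < (index + 5 - PySem.Str.len poss).toNat := by
  rw [PySem.Str.len_append]
  omega

-- the while loop of A; prime_list's invariant and 3 ≤ x_start are carried as proof arguments
-- (the loop only terminates on states satisfying them)
def get_pi_string_loop (index : Int) (poss : String) (primes : List Int) (x : Int)
    (hx : 3 ≤ x)
    (hinv : ∀ p : Int, p ∈ primes ↔ (2 ≤ p ∧ p < x ∧ Nat.Prime p.toNat)) : String :=
  if hg : PySem.Str.len poss < index + 5 then
    if hc : primes.any (fun i => PySem.Int.mod x i == 0) then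
      get_pi_string_loop index poss primes (x + 1) (pvSucc3 x hx)
        (pvInvComp x primes hx hinv hc)
    else
      get_pi_string_loop index (poss ++ PySem.Int.toStr x) (primes ++ [x]) (x + 1)
        (pvSucc3 x hx) (pvInvPrime x primes hx hinv hc)
  else poss
termination_by ((index + 5 - PySem.Str.len poss).toNat, pvGap x.toNat)
decreasing_by
  · exact Prod.Lex.right _
      (pvGapDecA x hx ((pvComposite_iff x primes hx hinv).mp ((pvAny_iff x primes).mp hc)))
  · exact Prod.Lex.left _ _ (pvLenDec index poss _ hg (pvToStr_len_pos x))

def get_pi_string (index : Int) : String :=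
  get_pi_string_loop index "2" [2] 3 (le_refl 3) pvInvInit

-- ===== PORT B =====
theorem pvDivisorDec (m d : Int) (h : d * d ≤ m) :
    (m + 1 - (d + 1)).toNat < (m + 1 - d).toNat := by
  have hdm : d ≤ m := by
    rcases Int.lt_or_le d 1 with h0 | h0
    · have := mul_self_nonneg d
      linarith
    · have h1 : d * 1 ≤ d * d := mul_le_mul_of_nonneg_left (by omega) (by omega)
      linarith
  omega

-- is_prime's inner while loop: divisors d while d*d ≤ m
def pv_is_prime_loop (m d : Int) : Bool :=
  if d * d ≤ m then
    if PySem.Int.mod m d == 0 then false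
    else pv_is_prime_loop m (d + 1)
  else true
termination_by (m + 1 - d).toNat
decreasing_by
  exact pvDivisorDec m d (by assumption)

def pv_is_prime (m : Int) : Bool :=
  if m < 2 then false else pv_is_prime_loop m 2

-- no divisor of a prime in the scanned range (cited by the alt loop's termination proof;
-- the full characterisation of is_prime is proved with the equivalence lemmas below)
theorem pvNoDvd_of_prime (m : Int) (hm : 2 ≤ m) (hp : Nat.Prime m.toNat) :
    ∀ e : Int, 2 ≤ e → e * e ≤ m → ¬ e ∣ m := by
  intro e he hsq hdvd
  have hd : e.toNat ∣ m.toNat := by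
    have h := Int.natAbs_dvd_natAbs.mpr hdvd
    have e1 : e.natAbs = e.toNat := by omega
    have e2 : m.natAbs = m.toNat := by omega
    rwa [e1, e2] at h
  rcases hp.eq_one_or_self_of_dvd _ hd with h | h
  · omega
  · have hem : e = m := by omega
    subst hem
    have h2 : 2 * e ≤ e * e := mul_le_mul_of_nonneg_right he (by omega)
    linarith

theorem pvIsPrimeLoop_of : ∀ (k : Nat) (m d : Int), (m + 1 - d).toNat ≤ k → 2 ≤ d →
    (∀ e : Int, d ≤ e → e * e ≤ m → ¬ e ∣ m) → pv_is_prime_loop m d = true := by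
  intro k
  induction k with
  | zero =>
    intro m d hk hd h
    rw [pv_is_prime_loop, if_neg]
    intro hsq
    have := pvDivisorDec m d hsq
    omega
  | succ k ih =>
    intro m d hk hd h
    rw [pv_is_prime_loop]
    by_cases hsq : d * d ≤ m
    · have hnd : ¬ (PySem.Int.mod m d == 0) := by
        intro hb
        exact h d le_rfl hsq ((PySem.Int.mod_eq_zero_iff_dvd m d).mp (beq_iff_eq.mp hb))
      rw [if_pos hsq, if_neg hnd]
      have := pvDivisorDec m d hsq
      exact ih m (d + 1) (by omega) (by omega) (fun e he => h e (by omega))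
    · rw [if_neg hsq]

theorem pvIsPrime_of_prime (m : Int) (hm : 2 ≤ m) (hp : Nat.Prime m.toNat) :
    pv_is_prime m = true := by
  unfold pv_is_prime
  rw [if_neg (by omega)]
  exact pvIsPrimeLoop_of (m + 1 - 2).toNat m 2 le_rfl le_rfl
    (fun e he => pvNoDvd_of_prime m hm hp e he)

theorem pvSucc2 (n : Int) (hn : 2 ≤ n) : 2 ≤ n + 1 := by omega

theorem pvGapDecB (n : Int) (hn : 2 ≤ n) (hp : ¬ (pv_is_prime (n + 1) = true)) :
    pvGap (n + 1 + 1).toNat < pvGap (n + 1).toNat := by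
  have hnp : ¬ Nat.Prime (n + 1).toNat := fun h =>
    hp (pvIsPrime_of_prime (n + 1) (by omega) h)
  have h : (n + 1 + 1).toNat = (n + 1).toNat + 1 := by omega
  rw [h]
  exact pvGap_lt _ hnp

-- the main while loop of B; 2 ≤ n carried as a proof argument (needed for termination)
def get_pi_string_alt_loop (index : Int) (s : String) (n : Int) (hn : 2 ≤ n) : String :=
  if hg : PySem.Str.len s < index + 5 then
    if hp : pv_is_prime (n + 1) then
      get_pi_string_alt_loop index (s ++ PySem.Int.toStr (n + 1)) (n + 1) (pvSucc2 n hn)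
    else
      get_pi_string_alt_loop index s (n + 1) (pvSucc2 n hn)
  else s
termination_by ((index + 5 - PySem.Str.len s).toNat, pvGap (n + 1).toNat)
decreasing_by
  · exact Prod.Lex.left _ _ (pvLenDec index s _ hg (pvToStr_len_pos (n + 1)))
  · exact Prod.Lex.right _ (pvGapDecB n hn hp)

def get_pi_string_alt (index : Int) : String :=
  get_pi_string_alt_loop index "2" 2 (le_refl 2)

-- ===== PRECONDITION & SPEC =====
def Spec_get_pi_string (index : Int) (out : String) : Prop := out = get_pi_string_alt index
instance (index : Int) (out : String) : Decidable (Spec_get_pi_string index out) := by unfold Spec_get_pi_string; infer_instance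

-- ===== CLAIM (what is proved, stated in full; the proofs are below) =====
def Claim_equal_get_pi_string : Prop := ∀ (index : Int), Dom_get_pi_string index → Spec_get_pi_string index (get_pi_string index)

-- ===== LEMMAS AND PROOFS =====

-- full characterisation of the divisor loop
theorem pvIsPrimeLoop_iff : ∀ (k : Nat) (m d : Int), (m + 1 - d).toNat ≤ k → 2 ≤ d →
    (pv_is_prime_loop m d = true ↔ ∀ e : Int, d ≤ e → e * e ≤ m → ¬ e ∣ m) := by
  intro k
  induction k with
  | zero =>
    intro m d hk hd
    have hlt : ¬ d * d ≤ m := by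
      intro hsq
      have := pvDivisorDec m d hsq
      omega
    rw [pv_is_prime_loop, if_neg hlt]
    simp only [true_iff]
    intro e he hsq hdvd
    have : d * d ≤ e * e := mul_le_mul he he (by omega) (by omega)
    omega
  | succ k ih =>
    intro m d hk hd
    rw [pv_is_prime_loop]
    by_cases hsq : d * d ≤ m
    · rw [if_pos hsq]
      by_cases hdv : PySem.Int.mod m d == 0
      · rw [if_pos hdv]
        refine iff_of_false (by simp) ?_
        intro h
        exact h d le_rfl hsq ((PySem.Int.mod_eq_zero_iff_dvd m d).mp (beq_iff_eq.mp hdv))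
      · rw [if_neg hdv]
        have hdm := pvDivisorDec m d hsq
        rw [ih m (d + 1) (by omega) (by omega)]
        have hndvd : ¬ d ∣ m := fun h => hdv (by
          simp [PySem.Int.mod_eq_zero_iff_dvd, h])
        constructor
        · intro h e he hsq' hdvd
          rcases lt_or_eq_of_le he with h' | h'
          · exact h e (by omega) hsq' hdvd
          · exact hndvd (h' ▸ hdvd)
        · intro h e he hsq' hdvd
          exact h e (by omega) hsq' hdvd
    · rw [if_neg hsq]
      simp only [true_iff]
      intro e he hsq' hdvd
      have : d * d ≤ e * e := mul_le_mul he he (by omega) (by omega)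
      omega

-- is_prime m decides Nat primality for m ≥ 2
theorem pvIsPrime_iff (m : Int) (hm : 2 ≤ m) : pv_is_prime m = true ↔ Nat.Prime m.toNat := by
  unfold pv_is_prime
  rw [if_neg (by omega)]
  rw [pvIsPrimeLoop_iff (m + 1 - 2).toNat m 2 le_rfl (by omega)]
  constructor
  · intro h
    by_contra hnp
    have h0 : 0 < m.toNat := by omega
    have hsq := Nat.minFac_sq_le_self h0 hnp
    have hp := Nat.minFac_prime (by omega : m.toNat ≠ 1)
    have hdvd := Nat.minFac_dvd m.toNat
    refine h (m.toNat.minFac : Int) (by exact_mod_cast hp.two_le) ?_ ?_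
    · have : (m.toNat.minFac * m.toNat.minFac : Nat) ≤ m.toNat := by rw [← pow_two]; exact hsq
      have h2 : ((m.toNat.minFac * m.toNat.minFac : Nat) : Int) ≤ (m.toNat : Int) := by
        exact_mod_cast this
      push_cast at h2
      rwa [Int.toNat_of_nonneg (by omega : (0:Int) ≤ m)] at h2
    · have : (m.toNat.minFac : Int) ∣ (m.toNat : Int) := Int.natCast_dvd_natCast.mpr hdvd
      rwa [Int.toNat_of_nonneg (by omega : (0:Int) ≤ m)] at this
  · intro hp e he hsq hdvd
    exact pvNoDvd_of_prime m hm (by assumption) e (by omega) hsq hdvd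

-- A's loop at candidate n+1 with prime_list = primes below n+1 equals B's loop at n
theorem pvLoop_eq : ∀ (k1 k2 : Nat) (index : Int) (poss : String) (primes : List Int) (n : Int)
    (hx : 3 ≤ n + 1)
    (hinv : ∀ p : Int, p ∈ primes ↔ (2 ≤ p ∧ p < n + 1 ∧ Nat.Prime p.toNat))
    (hn : 2 ≤ n),
    (index + 5 - PySem.Str.len poss).toNat ≤ k1 → pvGap (n + 1).toNat ≤ k2 →
    get_pi_string_loop index poss primes (n + 1) hx hinv =
      get_pi_string_alt_loop index poss n hn := by
  intro k1
  induction k1 with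
  | zero =>
    intro k2 index poss primes n hx hinv hn hk1 _
    have hng : ¬ PySem.Str.len poss < index + 5 := by omega
    rw [get_pi_string_loop, dif_neg hng, get_pi_string_alt_loop, dif_neg hng]
  | succ k1 IH1 =>
    intro k2
    induction k2 with
    | zero =>
      intro index poss primes n hx hinv hn hk1 hk2
      by_cases hg : PySem.Str.len poss < index + 5
      · have hP : Nat.Prime (n + 1).toNat := by
          by_contra hnp
          have := pvGap_lt (n + 1).toNat hnp
          omega
        have hA : ¬ (primes.any (fun i => PySem.Int.mod (n + 1) i == 0) = true) := by
          rw [pvAny_iff, pvComposite_iff (n + 1) primes hx hinv]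
          simpa using hP
        have hB : pv_is_prime (n + 1) = true := (pvIsPrime_iff (n + 1) (by omega)).mpr hP
        rw [get_pi_string_loop, dif_pos hg, dif_neg hA,
          get_pi_string_alt_loop, dif_pos hg, dif_pos hB]
        apply IH1 (pvGap (n + 1 + 1).toNat)
        · have := pvToStr_len_pos (n + 1)
          rw [PySem.Str.len_append]
          omega
        · exact le_rfl
      · rw [get_pi_string_loop, dif_neg hg, get_pi_string_alt_loop, dif_neg hg]
    | succ k2 IH2 =>
      intro index poss primes n hx hinv hn hk1 hk2
      by_cases hg : PySem.Str.len poss < index + 5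
      · by_cases hP : Nat.Prime (n + 1).toNat
        · have hA : ¬ (primes.any (fun i => PySem.Int.mod (n + 1) i == 0) = true) := by
            rw [pvAny_iff, pvComposite_iff (n + 1) primes hx hinv]
            simpa using hP
          have hB : pv_is_prime (n + 1) = true := (pvIsPrime_iff (n + 1) (by omega)).mpr hP
          rw [get_pi_string_loop, dif_pos hg, dif_neg hA,
            get_pi_string_alt_loop, dif_pos hg, dif_pos hB]
          apply IH1 (pvGap (n + 1 + 1).toNat)
          · have := pvToStr_len_pos (n + 1)
            rw [PySem.Str.len_append]
            omega
          · exact le_rfl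
        · have hA : primes.any (fun i => PySem.Int.mod (n + 1) i == 0) = true := by
            rw [pvAny_iff, pvComposite_iff (n + 1) primes hx hinv]
            exact hP
          have hB : ¬ (pv_is_prime (n + 1) = true) := by
            rw [pvIsPrime_iff (n + 1) (by omega)]
            exact hP
          rw [get_pi_string_loop, dif_pos hg, dif_pos hA,
            get_pi_string_alt_loop, dif_pos hg, dif_neg hB]
          apply IH2
          · exact hk1
          · have h : (n + 1 + 1).toNat = (n + 1).toNat + 1 := by omega
            rw [h]
            have := pvGap_lt (n + 1).toNat hP
            omega
      · rw [get_pi_string_loop, dif_neg hg, get_pi_string_alt_loop, dif_neg hg]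

-- ===== VERDICT (by name: the statement is the Claim_ definition above) =====
theorem get_pi_string_spec : Claim_equal_get_pi_string := by
  intro index _
  unfold Spec_get_pi_string get_pi_string get_pi_string_alt
  exact pvLoop_eq (index + 5 - PySem.Str.len "2").toNat (pvGap ((2:Int) + 1).toNat)
    index "2" [2] 2 (by omega) _ (by omega) le_rfl le_rfl
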